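-- pv_equiv track=rewrite | github.com/sukeesh/Jarvis | jarviscli/plugins/dnd.py | parseRoll
-- ===== SOURCE A (Python) =====
-- def parseRoll(userInput):
--     numberOfDice = 0
--     dieType = 0
--     parsingSecondHalf = False
--     parsingThirdHalf = False
--     advantage = ""
--     adv = 0 # 1 -> advantage, -1 -> disadvantage, None -> nothing, 0 -> error
--
--     for letter in userInput:
--         if parsingSecondHalf == False:
--             if letter.isdigit():
--                 numberOfDice = numberOfDice * 10 + int(letter)
--             elif letter == 'd' or letter == 'D':
--                 parsingSecondHalf = True
--         else:
--             if parsingThirdHalf == False and letter.isdigit():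
--                 dieType = dieType * 10 + int(letter)
--             elif letter.isalpha():
--                 advantage += letter
--                 parsingThirdHalf = True
--
--     if advantage == "adv" or advantage == "Adv" or advantage == "ADV":
--         adv = 1
--     elif advantage == "dis" or advantage == "Dis" or advantage == "DIS":
--         adv = -1
--     elif advantage == "":
--         adv = None
--     else:
--         adv = 0
--     return numberOfDice, dieType, adv
-- ===== SOURCE B (Python) =====
-- def _digitsValue(chars):
--     n = 0
--     for c in chars:
--         n = n * 10 + int(c)
--     return n
--
--
-- def parseRoll(userInput):
--     # Split at the first 'd'/'D' and filter characters, instead of a one-pass state machine.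
--     i = next((k for k, c in enumerate(userInput) if c in 'dD'), len(userInput))
--     before, after = userInput[:i], userInput[i + 1:]
--     j = next((k for k, c in enumerate(after) if c.isalpha()), len(after))
--     numberOfDice = _digitsValue(c for c in before if c.isdigit())
--     dieType = _digitsValue(c for c in after[:j] if c.isdigit())
--     advantage = ''.join(c for c in after if c.isalpha())
--     if advantage in ('adv', 'Adv', 'ADV'):
--         adv = 1
--     elif advantage in ('dis', 'Dis', 'DIS'):
--         adv = -1
--     elif advantage == '':
--         adv = None
--     else:
--         adv = 0
--     return numberOfDice, dieType, adv
-- ===== Notes on version B (the rewrite author's own statement) =====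
-- stated objective: simpler
-- what changed: Replaces A's single-pass five-variable state machine by splitting the input at the first die marker letter, filtering digit/alpha characters out of the two halves, and a tuple-membership test for the advantage word.
import Mathlib
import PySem

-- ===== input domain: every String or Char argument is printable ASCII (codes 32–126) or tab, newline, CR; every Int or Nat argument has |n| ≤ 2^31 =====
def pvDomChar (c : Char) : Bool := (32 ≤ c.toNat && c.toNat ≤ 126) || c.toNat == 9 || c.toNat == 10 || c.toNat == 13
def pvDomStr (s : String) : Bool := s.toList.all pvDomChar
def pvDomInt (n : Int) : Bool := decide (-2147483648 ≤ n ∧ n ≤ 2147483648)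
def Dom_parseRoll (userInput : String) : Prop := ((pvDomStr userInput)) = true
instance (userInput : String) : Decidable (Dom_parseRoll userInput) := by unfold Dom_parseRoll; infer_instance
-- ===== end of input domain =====

-- B replaces A's one-pass five-variable state machine by a split at the first die marker plus
-- character filters over the two halves (objective: simpler decomposition, same cost).

-- ===== PORT A =====
-- A's loop state: (numberOfDice, dieType, parsingSecondHalf, parsingThirdHalf, advantage)
-- int(letter) for a letter with letter.isdigit() is (letter.toNat : Int) - 48 (exact on ASCII digits).
def pvStepA (s : Int × Int × Bool × Bool × List Char) (letter : Char) :
    Int × Int × Bool × Bool × List Char :=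
  let (numberOfDice, dieType, parsingSecondHalf, parsingThirdHalf, advantage) := s
  if parsingSecondHalf = false then
    if PySem.Chars.isdigit letter then
      (numberOfDice * 10 + ((letter.toNat : Int) - 48), dieType, parsingSecondHalf, parsingThirdHalf, advantage)
    else if letter = 'd' ∨ letter = 'D' then
      (numberOfDice, dieType, true, parsingThirdHalf, advantage)
    else s
  else
    if parsingThirdHalf = false ∧ PySem.Chars.isdigit letter then
      (numberOfDice, dieType * 10 + ((letter.toNat : Int) - 48), parsingSecondHalf, parsingThirdHalf, advantage)
    else if PySem.Chars.isalpha letter then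
      (numberOfDice, dieType, parsingSecondHalf, true, advantage ++ [letter])
    else s

def parseRoll (userInput : String) : Int × Int × Option Int :=
  let r := userInput.toList.foldl pvStepA (0, 0, false, false, [])
  let numberOfDice := r.1
  let dieType := r.2.1
  let advantage := r.2.2.2.2
  let adv : Option Int :=
    if advantage = ['a','d','v'] ∨ advantage = ['A','d','v'] ∨ advantage = ['A','D','V'] then some 1
    else if advantage = ['d','i','s'] ∨ advantage = ['D','i','s'] ∨ advantage = ['D','I','S'] then some (-1)
    else if advantage = [] then none
    else some 0
  (numberOfDice, dieType, adv)

-- ===== PORT B =====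
-- port of Source B's _digitsValue (accumulator loop; int(c) = (c.toNat : Int) - 48 on ASCII digits)
def pvDigitsValue (chars : List Char) : Int :=
  chars.foldl (fun n c => n * 10 + ((c.toNat : Int) - 48)) 0

def parseRoll_alt (userInput : String) : Int × Int × Option Int :=
  let l := userInput.toList
  let i := l.findIdx (fun c => ['d','D'].contains c)      -- next((k …), len(userInput))
  let before := l.take i                                   -- userInput[:i]
  let after := l.drop (i + 1)                              -- userInput[i+1:]
  let j := after.findIdx PySem.Chars.isalpha               -- next((k …), len(after))
  let numberOfDice := pvDigitsValue (before.filter PySem.Chars.isdigit)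
  let dieType := pvDigitsValue ((after.take j).filter PySem.Chars.isdigit)
  let advantage := after.filter PySem.Chars.isalpha
  let adv : Option Int :=
    if advantage ∈ [['a','d','v'], ['A','d','v'], ['A','D','V']] then some 1
    else if advantage ∈ [['d','i','s'], ['D','i','s'], ['D','I','S']] then some (-1)
    else if advantage = [] then none
    else some 0
  (numberOfDice, dieType, adv)

-- ===== PRECONDITION & SPEC =====
def Spec_parseRoll (userInput : String) (out : Int × Int × Option Int) : Prop := out = parseRoll_alt userInput
instance (userInput : String) (out : Int × Int × Option Int) : Decidable (Spec_parseRoll userInput out) := by unfold Spec_parseRoll; infer_instance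

-- ===== CLAIM (what is proved, stated in full; the proofs are below) =====
def Claim_equal_parseRoll : Prop := ∀ (userInput : String), Dom_parseRoll userInput → Spec_parseRoll userInput (parseRoll userInput)

-- ===== LEMMAS AND PROOFS =====

theorem pv_alpha_not_digit (c : Char) (h : PySem.Chars.isalpha c = true) :
    PySem.Chars.isdigit c = false := by
  simp only [PySem.Chars.isalpha, PySem.Chars.isdigit, PySem.Chars.isupper, PySem.Chars.islower,
    Char.le_def, Bool.or_eq_true, Bool.and_eq_true, decide_eq_true_eq,
    Bool.and_eq_false_iff, decide_eq_false_iff_not, UInt32.le_iff_toNat_le,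
    (by decide : 'a'.val.toNat = 97), (by decide : 'z'.val.toNat = 122),
    (by decide : 'A'.val.toNat = 65), (by decide : 'Z'.val.toNat = 90),
    (by decide : '0'.val.toNat = 48), (by decide : '9'.val.toNat = 57)] at h ⊢
  omega

-- phase 3: parsingSecondHalf and parsingThirdHalf both set — only alphas are appended
theorem pv_phase3 (l : List Char) (nd dt : Int) (advL : List Char) :
    l.foldl pvStepA (nd, dt, true, true, advL)
      = (nd, dt, true, true, advL ++ l.filter PySem.Chars.isalpha) := by
  induction l generalizing advL with
  | nil => simp
  | cons c t ih =>
    by_cases ha : PySem.Chars.isalpha c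
    · simp [pvStepA, ha, ih]
    · simp [pvStepA, ha, ih]

-- phase 2: parsingSecondHalf set, parsingThirdHalf not yet — digits go to dieType until the
-- first alpha, from which point all alphas go to advantage
theorem pv_phase2 (l : List Char) (nd dt : Int) (advL : List Char) :
    l.foldl pvStepA (nd, dt, true, false, advL)
      = (nd,
         ((l.take (l.findIdx PySem.Chars.isalpha)).filter PySem.Chars.isdigit).foldl
           (fun n c => n * 10 + ((c.toNat : Int) - 48)) dt,
         true, l.any PySem.Chars.isalpha, advL ++ l.filter PySem.Chars.isalpha) := by
  induction l generalizing dt advL with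
  | nil => simp
  | cons c t ih =>
    by_cases ha : PySem.Chars.isalpha c
    · have hd := pv_alpha_not_digit c ha
      simp [pvStepA, ha, hd, List.findIdx_cons, pv_phase3]
    · by_cases hdig : PySem.Chars.isdigit c
      · simp [pvStepA, ha, hdig, List.findIdx_cons, ih]
      · simp [pvStepA, ha, hdig, List.findIdx_cons, ih]

-- whole run from the initial state
theorem pv_main (l : List Char) (nd : Int) :
    l.foldl pvStepA (nd, 0, false, false, [])
      = (((l.take (l.findIdx (fun c => c = 'd' ∨ c = 'D'))).filter PySem.Chars.isdigit).foldl
           (fun n c => n * 10 + ((c.toNat : Int) - 48)) nd,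
         (let a := l.drop (l.findIdx (fun c => c = 'd' ∨ c = 'D') + 1);
          ((a.take (a.findIdx PySem.Chars.isalpha)).filter PySem.Chars.isdigit).foldl
            (fun n c => n * 10 + ((c.toNat : Int) - 48)) 0),
         l.any (fun c => c = 'd' ∨ c = 'D'),
         (l.drop (l.findIdx (fun c => c = 'd' ∨ c = 'D') + 1)).any PySem.Chars.isalpha,
         (l.drop (l.findIdx (fun c => c = 'd' ∨ c = 'D') + 1)).filter PySem.Chars.isalpha) := by
  induction l generalizing nd with
  | nil => simp
  | cons c t ih =>
    by_cases hdD : c = 'd' ∨ c = 'D'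
    · rcases hdD with rfl | rfl
      · simp [pvStepA, List.findIdx_cons, (by decide : PySem.Chars.isdigit 'd' = false), pv_phase2]
      · simp [pvStepA, List.findIdx_cons, (by decide : PySem.Chars.isdigit 'D' = false), pv_phase2]
    · obtain ⟨h1, h2⟩ := not_or.mp hdD
      by_cases hdig : PySem.Chars.isdigit c
      · simp [pvStepA, h1, h2, hdig, List.findIdx_cons, ih]
      · simp [pvStepA, h1, h2, hdig, List.findIdx_cons, ih]

theorem pv_contains_dD (c : Char) : (['d','D'].contains c) = decide (c = 'd' ∨ c = 'D') := by
  by_cases h1 : c = 'd' <;> by_cases h2 : c = 'D' <;> simp [h1, h2]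

-- ===== VERDICT (by name: the statement is the Claim_ definition above) =====
set_option maxRecDepth 8192 in
theorem parseRoll_spec : Claim_equal_parseRoll := by
  intro userInput _
  show parseRoll userInput = parseRoll_alt userInput
  unfold parseRoll parseRoll_alt pvDigitsValue
  have hpred : (fun c => ['d','D'].contains c) = (fun c => decide (c = 'd' ∨ c = 'D')) := by
    funext c; exact pv_contains_dD c
  rw [hpred, pv_main]
  simp only [List.mem_cons, List.not_mem_nil, or_false]
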